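-- pv_equiv track=rewrite | github.com/AadvikVashist/Dorian-Gray-Deconstruction | main.py | find_closest_sentences
-- ===== SOURCE A (Python) =====
-- def find_closest_sentences(sentence_1_ind, sentence_2_ind):
--         # Initialize pointers and variables to store the minimum difference and pairs
--     pairs = []
--     used_indices = set()
--     list1 = sentence_1_ind
--     for value1 in sentence_1_ind:
--         closest_value = None
--         closest_diff = float('inf')
--         closest_index = -1
--
--         for i, value2 in enumerate(sentence_2_ind):
--             if i not in used_indices:
--                 diff = abs(value1 - value2)
--                 if diff < closest_diff:
--                     closest_diff = diff
--                     closest_value = value2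
--                     closest_index = i
--
--         # Mark the index as used and store the pair
--         used_indices.add(closest_index)
--         pairs.append((value1, closest_value))
--     pairs = [pair for pair in pairs if abs(pair[0] - pair[1]) < 30]
--     return pairs
-- ===== SOURCE B (Python) =====
-- import bisect
--
-- def find_closest_sentences(sentence_1_ind, sentence_2_ind):
--     # sorted pool of (value, original_index); bisect finds the nearest unused value,
--     # tie broken by smallest original index (as A's first-wins scan does)
--     arr = sorted((v, i) for i, v in enumerate(sentence_2_ind))
--     vals = [v for v, _ in arr]
--     pairs = []
--     for v in sentence_1_ind:
--         j = bisect.bisect_left(vals, v)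
--         cand = []
--         if j < len(arr):
--             rv, ri = arr[j]
--             cand.append((rv - v, ri, j))
--         if j > 0:
--             lv = vals[j - 1]
--             k = bisect.bisect_left(vals, lv)
--             cand.append((v - lv, arr[k][1], k))
--         _, _, pos = min(cand)
--         pairs.append((v, arr[pos][0]))
--         del arr[pos]
--         del vals[pos]
--     return [(a, b) for a, b in pairs if abs(a - b) < 30]
-- ===== Notes on version B (the rewrite author's own statement) =====
-- stated objective: faster
-- what changed: B keeps the candidate (value, original-index) pairs in one sorted list and finds each nearest unused value by binary search (bisect) over that list, deleting the matched entry, instead of A's linear rescan of all of list2 (with a used-index set) for every element of list1; ties are broken by smallest original index exactly as A's first-wins scan does.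
import Mathlib
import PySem

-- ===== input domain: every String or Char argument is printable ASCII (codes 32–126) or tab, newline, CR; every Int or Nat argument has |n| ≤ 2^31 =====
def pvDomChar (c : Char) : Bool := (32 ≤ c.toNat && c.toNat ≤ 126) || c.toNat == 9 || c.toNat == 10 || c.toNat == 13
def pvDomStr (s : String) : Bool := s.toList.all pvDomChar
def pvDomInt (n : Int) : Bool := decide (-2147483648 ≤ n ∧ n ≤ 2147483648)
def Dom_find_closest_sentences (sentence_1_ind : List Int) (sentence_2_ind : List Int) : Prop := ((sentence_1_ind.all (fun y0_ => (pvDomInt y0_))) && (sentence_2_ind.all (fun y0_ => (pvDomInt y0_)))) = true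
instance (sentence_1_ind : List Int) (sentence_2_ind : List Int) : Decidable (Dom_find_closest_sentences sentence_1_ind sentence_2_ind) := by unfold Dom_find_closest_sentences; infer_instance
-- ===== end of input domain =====

-- B replaces A's per-element linear rescan of list2 by one sorted (value, index) pool
-- with binary search for the nearest unused value (objective: faster).


-- ===== PORT A =====
-- inner 'for i, value2 in enumerate(sentence_2_ind)' loop; state = (closest_diff (none = inf), closest_value, closest_index)
def pvAInner (sentence_2_ind : List Int) (used : PySem.Set Int) (value1 : Int) :
    Option Int × Option Int × Int :=
  (PySem.List.enumerate sentence_2_ind).foldl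
    (fun acc p =>
      if PySem.Set.contains used p.1 then acc
      else
        let diff := |value1 - p.2|
        match acc.1 with
        | none => (some diff, some p.2, p.1)          -- diff < float('inf')
        | some d => if diff < d then (some diff, some p.2, p.1) else acc)
    (none, none, -1)

-- outer loop body: state = (pairs, used_indices)
def pvAStep (sentence_2_ind : List Int) (st : List (Int × Option Int) × PySem.Set Int)
    (value1 : Int) : List (Int × Option Int) × PySem.Set Int :=
  let r := pvAInner sentence_2_ind st.2 value1
  (st.1 ++ [(value1, r.2.1)], PySem.Set.add st.2 r.2.2)

def find_closest_sentences (sentence_1_ind : List Int) (sentence_2_ind : List Int) :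
    List (Int × Int) :=
  let st := sentence_1_ind.foldl (pvAStep sentence_2_ind) ([], PySem.Set.empty)
  -- final comprehension; on a (value1, None) pair Python raises TypeError (excluded by Pre_)
  st.1.filterMap (fun p => p.2.bind (fun b => if |p.1 - b| < 30 then some (p.1, b) else none))

-- ===== PORT B =====
-- bisect.bisect_left on a sorted list = number of leading elements < v (exact there)
def pvBisectLeft (vals : List Int) (v : Int) : Nat :=
  (vals.takeWhile (fun x => decide (x < v))).length

-- Python '<' on the (diff, index, pos) candidate triples (lexicographic)
def pvLt3 (a b : Int × Int × Nat) : Bool :=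
  decide (a.1 < b.1) ||
    (a.1 == b.1 && (decide (a.2.1 < b.2.1) || (a.2.1 == b.2.1 && decide (a.2.2 < b.2.2))))

-- Python min(cand): first minimal element wins
def pvMin3 (c : Int × Int × Nat) (cs : List (Int × Int × Nat)) : Int × Int × Nat :=
  cs.foldl (fun m x => if pvLt3 x m then x else m) c

-- loop body: state = (pairs, arr, vals)
def pvBStep (st : List (Int × Int) × List (Int × Int) × List Int) (v : Int) :
    List (Int × Int) × List (Int × Int) × List Int :=
  let pairs := st.1
  let arr := st.2.1
  let vals := st.2.2
  let j := pvBisectLeft vals v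
  let candR : List (Int × Int × Nat) :=
    if j < arr.length then [((arr.getD j (0, 0)).1 - v, (arr.getD j (0, 0)).2, j)] else []
  let candL : List (Int × Int × Nat) :=
    if 0 < j then
      let lv := vals.getD (j - 1) 0
      let k := pvBisectLeft vals lv
      [(v - lv, (arr.getD k (0, 0)).2, k)]
    else []
  match candR ++ candL with
  | [] => st        -- Python: min([]) raises ValueError; unreachable under Pre_
  | c :: cs =>
    let m := pvMin3 c cs
    let pos := m.2.2
    (pairs ++ [(v, (arr.getD pos (0, 0)).1)], arr.eraseIdx pos, vals.eraseIdx pos)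

def find_closest_sentences_alt (sentence_1_ind : List Int) (sentence_2_ind : List Int) :
    List (Int × Int) :=
  -- arr = sorted((v, i) for i, v in enumerate(sentence_2_ind)): tuple sort = sorted2
  let arr0 := PySem.List.sorted2
    ((PySem.List.enumerate sentence_2_ind).map (fun p => (p.2, p.1)))
    (fun q => q.1) (fun q => q.2) false
  let vals0 := arr0.map (fun q => q.1)
  let st := sentence_1_ind.foldl pvBStep ([], arr0, vals0)
  st.1.filter (fun p => decide (|p.1 - p.2| < 30))

-- ===== PRECONDITION & SPEC =====
-- Pre_ excludes exactly the inputs where Python A raises: with len(list1) > len(list2) the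
-- candidate pool runs dry, a (value1, None) pair is appended and the final abs() raises TypeError.
def Pre_find_closest_sentences (sentence_1_ind : List Int) (sentence_2_ind : List Int) : Prop :=
  sentence_1_ind.length ≤ sentence_2_ind.length
instance (sentence_1_ind : List Int) (sentence_2_ind : List Int) :
    Decidable (Pre_find_closest_sentences sentence_1_ind sentence_2_ind) := by
  unfold Pre_find_closest_sentences; infer_instance
def pvWitness_find_closest_sentences : List Int × List Int := ([4, 100], [1, 90, 7])

def Spec_find_closest_sentences (sentence_1_ind : List Int) (sentence_2_ind : List Int) (out : List (Int × Int)) : Prop := out = find_closest_sentences_alt sentence_1_ind sentence_2_ind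
instance (sentence_1_ind : List Int) (sentence_2_ind : List Int) (out : List (Int × Int)) : Decidable (Spec_find_closest_sentences sentence_1_ind sentence_2_ind out) := by unfold Spec_find_closest_sentences; infer_instance

-- ===== CLAIM (what is proved, stated in full; the proofs are below) =====
def Claim_equal_find_closest_sentences : Prop := ∀ (sentence_1_ind : List Int) (sentence_2_ind : List Int), Dom_find_closest_sentences sentence_1_ind sentence_2_ind → Pre_find_closest_sentences sentence_1_ind sentence_2_ind → Spec_find_closest_sentences sentence_1_ind sentence_2_ind (find_closest_sentences sentence_1_ind sentence_2_ind)


-- ===== LEMMAS AND PROOFS =====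

-- non-strict lexicographic order on (value, index) pairs
def pvLexLe (a b : Int × Int) : Prop := a.1 < b.1 ∨ (a.1 = b.1 ∧ a.2 ≤ b.2)

-- strict order on (value,index) pairs by key (|v - value|, index)
def pvKeyLt (v : Int) (a b : Int × Int) : Prop :=
  |v - a.1| < |v - b.1| ∨ (|v - a.1| = |v - b.1| ∧ a.2 < b.2)

-- q is THE greedy choice from pool L for target v
def pvIsChoice (v : Int) (L : List (Int × Int)) (q : Int × Int) : Prop :=
  q ∈ L ∧ ∀ r ∈ L, r ≠ q → pvKeyLt v q r

-- same, in (index, value) representation (A's enumerate order)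
def pvKeyLtM (v : Int) (a b : Int × Int) : Prop :=
  |v - a.2| < |v - b.2| ∨ (|v - a.2| = |v - b.2| ∧ a.1 < b.1)

def pvIsChoiceM (v : Int) (M : List (Int × Int)) (q : Int × Int) : Prop :=
  q ∈ M ∧ ∀ r ∈ M, r ≠ q → pvKeyLtM v q r

-- A's remaining pool, in enumerate order
def pvF (sentence_2_ind : List Int) (used : PySem.Set Int) : List (Int × Int) :=
  (PySem.List.enumerate sentence_2_ind).filter (fun p => !(PySem.Set.contains used p.1))

-- pure form of A's inner fold once the accumulator is non-none
def pvSelGo (v : Int) (cur : Int × Int) (M : List (Int × Int)) : Int × Int :=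
  M.foldl (fun c p => if |v - p.2| < |v - c.2| then p else c) cur

theorem pvKeyLtM_trans (v : Int) (a b c : Int × Int)
    (h1 : pvKeyLtM v a b) (h2 : pvKeyLtM v b c) : pvKeyLtM v a c := by
  unfold pvKeyLtM at *; omega

theorem pvChoice_unique (v : Int) (L : List (Int × Int)) (q q' : Int × Int)
    (h : pvIsChoice v L q) (h' : pvIsChoice v L q') : q = q' := by
  by_contra hne
  have h1 := h.2 q' h'.1 (fun e => hne e.symm)
  have h2 := h'.2 q h.1 hne
  unfold pvKeyLt at h1 h2
  omega

theorem pvChoice_perm (v : Int) (L L' : List (Int × Int)) (q : Int × Int)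
    (hp : L.Perm L') (h : pvIsChoice v L q) : pvIsChoice v L' q :=
  ⟨hp.mem_iff.1 h.1, fun r hr => h.2 r (hp.mem_iff.2 hr)⟩

theorem pvChoiceM_swap (v : Int) (M : List (Int × Int)) (q : Int × Int)
    (h : pvIsChoiceM v M q) : pvIsChoice v (M.map Prod.swap) (q.2, q.1) := by
  constructor
  · exact List.mem_map.2 ⟨q, h.1, rfl⟩
  · intro r hr hne
    rcases List.mem_map.1 hr with ⟨p, hp, rfl⟩
    have hpq : p ≠ q := by
      intro e; subst e; exact hne rfl
    exact h.2 p hp hpq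

-- a foldl whose body skips guarded elements is a foldl over the filtered list
theorem pvFoldl_guard {β : Type} (p : Int × Int → Bool) (g : β → Int × Int → β) :
    ∀ (xs : List (Int × Int)) (init : β),
      xs.foldl (fun acc x => if p x then acc else g acc x) init =
        (xs.filter (fun x => !p x)).foldl g init := by
  intro xs
  induction xs with
  | nil => intro init; rfl
  | cons x xs ih =>
    intro init
    by_cases hx : p x = true <;> simp [hx, ih]

-- A's inner fold, once the state is (some d, some x, i), is pvSelGo
theorem pvAInner_go (v : Int) :
    ∀ (M : List (Int × Int)) (c : Int × Int),
      M.foldl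
        (fun acc p =>
          let diff := |v - p.2|
          match acc.1 with
          | none => (some diff, some p.2, p.1)
          | some d => if diff < d then (some diff, some p.2, p.1) else acc)
        (some |v - c.2|, some c.2, c.1) =
      (some |v - (pvSelGo v c M).2|, some (pvSelGo v c M).2, (pvSelGo v c M).1) := by
  intro M
  induction M with
  | nil => intro c; rfl
  | cons m M ih =>
    intro c
    by_cases h : |v - m.2| < |v - c.2| <;>
      simp only [pvSelGo, List.foldl_cons, h, if_true, if_false, ih]

theorem pvSelGo_choice (v : Int) :
    ∀ (M : List (Int × Int)) (c : Int × Int),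
      M.Pairwise (fun a b => a.1 < b.1) → (∀ r ∈ M, c.1 < r.1) →
      pvIsChoiceM v (c :: M) (pvSelGo v c M) := by
  intro M
  induction M with
  | nil =>
    intro c _ _
    exact ⟨List.mem_singleton.2 rfl, by intro r hr hne; simp at hr; exact absurd hr hne⟩
  | cons m M ih =>
    intro c hpw hlt
    rw [List.pairwise_cons] at hpw
    obtain ⟨hm, hMpw⟩ := hpw
    have hcm : c.1 < m.1 := hlt m (by simp)
    by_cases h : |v - m.2| < |v - c.2|
    · -- m replaces c
      have hIH := ih m hMpw hm
      have hsel : pvSelGo v c (m :: M) = pvSelGo v m M := by simp [pvSelGo, h]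
      rw [hsel]
      obtain ⟨hmem, hbest⟩ := hIH
      have kmc : pvKeyLtM v m c := Or.inl h
      have ksc : pvKeyLtM v (pvSelGo v m M) c := by
        rcases List.mem_cons.1 hmem with he | hM
        · rw [he]; exact kmc
        · by_cases hsm : pvSelGo v m M = m
          · rw [hsm]; exact kmc
          · exact pvKeyLtM_trans v _ _ _ (hbest m (by simp) (fun e => hsm e.symm)) kmc
      refine ⟨by simpa [List.mem_cons] using Or.inr (List.mem_cons.1 hmem), ?_⟩
      intro r hr hne
      rcases List.mem_cons.1 hr with rfl | hr'
      · exact ksc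
      · exact hbest r hr' hne
    · -- c stays
      have hIH := ih c hMpw (fun r hr => hlt r (List.mem_cons_of_mem _ hr))
      have hsel : pvSelGo v c (m :: M) = pvSelGo v c M := by simp [pvSelGo, h]
      rw [hsel]
      obtain ⟨hmem, hbest⟩ := hIH
      have kcm : pvKeyLtM v c m := by
        unfold pvKeyLtM; omega
      have ksm : pvKeyLtM v (pvSelGo v c M) m := by
        by_cases hsm : pvSelGo v c M = c
        · rw [hsm]; exact kcm
        · exact pvKeyLtM_trans v _ _ _ (hbest c (by simp) (fun e => hsm e.symm)) kcm
      refine ⟨?_, ?_⟩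
      · rcases List.mem_cons.1 hmem with he | hM
        · simp [he]
        · simp [List.mem_cons, hM]
      · intro r hr hne
        rcases List.mem_cons.1 hr with rfl | hr'
        · rcases List.mem_cons.1 hmem with he | hM
          · exact absurd he.symm hne
          · exact hbest r (by simp) hne
        · rcases List.mem_cons.1 hr' with rfl | hr''
          · exact ksm
          · exact hbest r (by simp [hr'']) hne

-- A's inner loop selects the greedy choice from the remaining pool
theorem pvAInner_eq (s2 : List Int) (used : PySem.Set Int) (v : Int) (q : Int × Int)
    (hne : pvF s2 used ≠ [])
    (hq : q = pvSelGo v (pvF s2 used).headI (pvF s2 used).tail) :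
    pvAInner s2 used v = (some |v - q.2|, some q.2, q.1) ∧ pvIsChoiceM v (pvF s2 used) q := by
  have hguard : pvAInner s2 used v =
      (pvF s2 used).foldl
        (fun acc p =>
          let diff := |v - p.2|
          match acc.1 with
          | none => (some diff, some p.2, p.1)
          | some d => if diff < d then (some diff, some p.2, p.1) else acc)
        (none, none, -1) := by
    unfold pvAInner pvF
    exact pvFoldl_guard (fun p => PySem.Set.contains used p.1) _ _ _
  have hpwF : (pvF s2 used).Pairwise (fun a b => a.1 < b.1) :=
    List.Pairwise.sublist List.filter_sublist (PySem.List.pairwise_lt_enumerate s2 0)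
  rcases hF : pvF s2 used with _ | ⟨f, t⟩
  · exact absurd hF hne
  · rw [hF] at hguard hpwF hq
    rw [List.pairwise_cons] at hpwF
    simp only [List.headI, List.tail_cons] at hq
    constructor
    · rw [hguard, List.foldl_cons]
      show (t.foldl _ (some |v - f.2|, some f.2, f.1)) = _
      rw [pvAInner_go v t f, hq]
    · rw [hq]
      exact pvSelGo_choice v t f hpwF.2 hpwF.1

theorem pvKeyLt_trans (v : Int) (a b c : Int × Int)
    (h1 : pvKeyLt v a b) (h2 : pvKeyLt v b c) : pvKeyLt v a c := by
  unfold pvKeyLt at *; omega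

theorem pvTakeWhile_not (p : Int → Bool) :
    ∀ (l : List Int) (h : (l.takeWhile p).length < l.length),
      p (l[(l.takeWhile p).length]'h) = false := by
  intro l
  induction l with
  | nil => intro h; simp at h
  | cons x xs ih =>
    intro h
    by_cases hx : p x = true
    · have hlen : ((x :: xs).takeWhile p).length = (xs.takeWhile p).length + 1 := by
        simp [hx]
      have h' : (xs.takeWhile p).length < xs.length := by
        simp [hlen] at h; omega
      have := ih h'
      simp only [hlen]
      simpa using this
    · simp only [Bool.not_eq_true] at hx
      simp [hx]

theorem pvBisect_le (vals : List Int) (v : Int) : pvBisectLeft vals v ≤ vals.length := by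
  unfold pvBisectLeft
  simpa using List.Sublist.length_le (List.IsPrefix.sublist (List.takeWhile_prefix _))

theorem pvBisect_lt (vals : List Int) (v : Int) (p : Nat) (hp : p < pvBisectLeft vals v)
    (hlen : p < vals.length) : vals[p] < v := by
  unfold pvBisectLeft at hp
  have hpre := List.takeWhile_prefix (l := vals) (fun x => decide (x < v))
  have hget := hpre.getElem (i := p) hp
  have hmem : (vals.takeWhile (fun x => decide (x < v)))[p] ∈
      vals.takeWhile (fun x => decide (x < v)) := List.getElem_mem _
  have := List.mem_takeWhile_imp hmem
  rw [hget] at this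
  simpa using this

theorem pvBisect_ge (vals : List Int) (v : Int) (h : pvBisectLeft vals v < vals.length) :
    v ≤ vals[pvBisectLeft vals v] := by
  have := pvTakeWhile_not (fun x => decide (x < v)) vals h
  simp at this
  exact this

theorem pvBStep_eq (v : Int) (pairs : List (Int × Int)) (arr : List (Int × Int))
    (hpw : arr.Pairwise pvLexLe) (hnd : (arr.map Prod.snd).Nodup) (hne : arr ≠ []) :
    ∃ (pos : Nat) (hpos : pos < arr.length),
      pvBStep (pairs, arr, arr.map Prod.fst) v =
        (pairs ++ [(v, (arr[pos]'hpos).1)], arr.eraseIdx pos, (arr.map Prod.fst).eraseIdx pos) ∧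
      pvIsChoice v arr (arr[pos]'hpos) := by
  classical
  set vals := arr.map Prod.fst with hvals_def
  have hvlen : vals.length = arr.length := by simp [hvals_def]
  have hvget : ∀ (p : Nat) (hp : p < arr.length), vals[p]'(by omega) = (arr[p]'hp).1 := by
    intro p hp; simp [hvals_def]
  have hvpw : vals.Pairwise (· ≤ ·) := by
    rw [hvals_def, List.pairwise_map]
    exact hpw.imp (fun {a b} h => by rcases h with h | ⟨h, _⟩ <;> omega)
  have hmono : ∀ (p q : Nat) (hpq : p ≤ q) (hq : q < vals.length), vals[p]'(by omega) ≤ vals[q]'hq := by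
    intro p q hpq hq
    rcases Nat.lt_or_ge p q with h | h
    · exact List.pairwise_iff_getElem.1 hvpw p q (by omega) hq h
    · have : p = q := by omega
      subst this; exact le_refl _
  have hsnd : ∀ (p q : Nat) (hp : p < arr.length) (hq : q < arr.length), p ≠ q →
      (arr[p]'hp).2 ≠ (arr[q]'hq).2 := by
    intro p q hp hq hne heq
    have hh : (arr.map Prod.snd)[p]'(by simpa) = (arr.map Prod.snd)[q]'(by simpa) := by
      simpa using heq
    exact hne (List.Nodup.getElem_inj_iff hnd |>.1 hh)
  have hlex : ∀ (p q : Nat) (hp : p < arr.length) (hq : q < arr.length), p < q →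
      pvLexLe (arr[p]'hp) (arr[q]'hq) := fun p q hp hq h =>
    List.pairwise_iff_getElem.1 hpw p q hp hq h
  set j := pvBisectLeft vals v with hj_def
  have hj_le : j ≤ arr.length := by rw [hj_def, ← hvlen]; exact pvBisect_le vals v
  have harrlen : 0 < arr.length := by
    cases arr with
    | nil => exact absurd rfl hne
    | cons a l => simp
  -- the choice assembler
  have mkChoice : ∀ (pos : Nat) (hpos : pos < arr.length),
      (∀ (p : Nat) (hp : p < arr.length), p ≠ pos → pvKeyLt v (arr[pos]'hpos) (arr[p]'hp)) →
      pvIsChoice v arr (arr[pos]'hpos) := by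
    intro pos hpos hall
    refine ⟨List.getElem_mem _, ?_⟩
    intro r hr hner
    rcases List.mem_iff_getElem.1 hr with ⟨p, hp, rfl⟩
    refine hall p hp (fun he => hner ?_)
    subst he; rfl
  -- facts about the right candidate
  have hRbest : ∀ (hj : j < arr.length) (p : Nat) (hp : p < arr.length), j ≤ p → p ≠ j →
      pvKeyLt v (arr[j]'hj) (arr[p]'hp) := by
    intro hj p hp hjp hpj
    have hjp' : j < p := by omega
    have hvj : v ≤ (arr[j]'hj).1 := by
      have := pvBisect_ge vals v (by omega)
      rwa [hvget j hj] at this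
    have hl := hlex j p hj hp hjp'
    have habsj : |v - (arr[j]'hj).1| = (arr[j]'hj).1 - v := by
      rw [abs_sub_comm]; exact abs_of_nonneg (by omega)
    have habsp : |v - (arr[p]'hp).1| = (arr[p]'hp).1 - v := by
      rw [abs_sub_comm]; exact abs_of_nonneg (by rcases hl with h | ⟨h, _⟩ <;> omega)
    rcases hl with h | ⟨heq, hle⟩
    · exact Or.inl (by omega)
    · exact Or.inr ⟨by omega, lt_of_le_of_ne hle (hsnd j p hj hp (by omega))⟩
  -- facts about the left candidate
  set lv := vals.getD (j - 1) 0 with hlv_def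
  set k := pvBisectLeft vals lv with hk_def
  have hj1len : 0 < j → j - 1 < vals.length := by omega
  have hlv : ∀ (hj0 : 0 < j), lv = vals[j - 1]'(hj1len hj0) := by
    intro hj0; rw [hlv_def]; exact List.getD_eq_getElem vals 0 (hj1len hj0)
  have hlvv : ∀ (hj0 : 0 < j), lv < v := by
    intro hj0; rw [hlv hj0]; exact pvBisect_lt vals v (j - 1) (by omega) (hj1len hj0)
  have hk_le : ∀ (hj0 : 0 < j), k ≤ j - 1 := by
    intro hj0
    by_contra hcon
    have := pvBisect_lt vals lv (j - 1) (by omega) (hj1len hj0)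
    rw [← hlv hj0] at this
    omega
  have hk_lt : ∀ (hj0 : 0 < j), k < arr.length := by
    intro hj0; have := hk_le hj0; omega
  have hkval : ∀ (hj0 : 0 < j), (arr[k]'(hk_lt hj0)).1 = lv := by
    intro hj0
    have h1 : lv ≤ vals[k]'(by rw [hvlen]; exact hk_lt hj0) := pvBisect_ge vals lv (by rw [hvlen]; exact hk_lt hj0)
    have h2 : vals[k]'(by rw [hvlen]; exact hk_lt hj0) ≤ vals[j - 1]'(hj1len hj0) :=
      hmono k (j - 1) (hk_le hj0) (hj1len hj0)
    rw [← hlv hj0] at h2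
    rw [← hvget k (hk_lt hj0)]
    omega
  have hLbest : ∀ (hj0 : 0 < j) (p : Nat) (hp : p < arr.length), p < j → p ≠ k →
      pvKeyLt v (arr[k]'(hk_lt hj0)) (arr[p]'hp) := by
    intro hj0 p hp hpj hpk
    have habsk : |v - (arr[k]'(hk_lt hj0)).1| = v - lv := by
      rw [hkval hj0]; exact abs_of_nonneg (by have := hlvv hj0; omega)
    have hpv : (arr[p]'hp).1 < v := by
      rw [← hvget p hp]; exact pvBisect_lt vals v p (by omega) (by omega)
    have habsp : |v - (arr[p]'hp).1| = v - (arr[p]'hp).1 := abs_of_nonneg (by omega)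
    rcases Nat.lt_or_ge p k with hpk' | hpk'
    · have : vals[p]'(by omega) < lv := pvBisect_lt vals lv p hpk' (by omega)
      rw [hvget p hp] at this
      exact Or.inl (by omega)
    · have hkp : k < p := by omega
      have h1 : vals[k]'(by rw [hvlen]; exact hk_lt hj0) ≤ vals[p]'(by omega) :=
        hmono k p (by omega) (by omega)
      have h2 : vals[p]'(by omega) ≤ vals[j - 1]'(hj1len hj0) := hmono p (j - 1) (by omega) (hj1len hj0)
      rw [← hlv hj0] at h2
      rw [hvget p hp] at h1 h2
      rw [hvget k (hk_lt hj0), hkval hj0] at h1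
      have hpeq : (arr[p]'hp).1 = lv := by omega
      have hl := hlex k p (hk_lt hj0) hp hkp
      rcases hl with h | ⟨_, hle⟩
      · rw [hkval hj0] at h; omega
      · exact Or.inr ⟨by omega, lt_of_le_of_ne hle (hsnd k p (hk_lt hj0) hp (by omega))⟩
  by_cases hjlt : j < arr.length
  · by_cases hj0 : 0 < j
    · -- both candidates
      have hkj : k < j := by have := hk_le hj0; omega
      have hsndkj : (arr[k]'(hk_lt hj0)).2 ≠ (arr[j]'hjlt).2 := hsnd k j (hk_lt hj0) hjlt (by omega)
      have hvj : v ≤ (arr[j]'hjlt).1 := by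
        have := pvBisect_ge vals v (by omega)
        rwa [hvget j hjlt] at this
      have habsR : |v - (arr[j]'hjlt).1| = (arr[j]'hjlt).1 - v := by
        rw [abs_sub_comm]; exact abs_of_nonneg (by omega)
      have habsL : |v - (arr[k]'(hk_lt hj0)).1| = v - lv := by
        rw [hkval hj0]; exact abs_of_nonneg (by have := hlvv hj0; omega)
      have hgdj : arr.getD j (0, 0) = arr[j]'hjlt := List.getD_eq_getElem arr (0, 0) hjlt
      have hgdk : arr.getD k (0, 0) = arr[k]'(hk_lt hj0) := List.getD_eq_getElem arr (0, 0) (hk_lt hj0)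
      by_cases hlt : pvLt3 (v - lv, (arr.getD k (0, 0)).2, k)
          ((arr.getD j (0, 0)).1 - v, (arr.getD j (0, 0)).2, j) = true
      · -- left candidate wins
        have hkey : pvKeyLt v (arr[k]'(hk_lt hj0)) (arr[j]'hjlt) := by
          rw [hgdj, hgdk] at hlt
          simp only [pvLt3, Bool.or_eq_true, Bool.and_eq_true, decide_eq_true_eq, beq_iff_eq] at hlt
          unfold pvKeyLt
          rw [habsL, habsR]
          rcases hlt with h | ⟨he, h | ⟨he2, _⟩⟩
          · exact Or.inl h
          · exact Or.inr ⟨he, h⟩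
          · exact absurd he2 hsndkj
        refine ⟨k, hk_lt hj0, ?_, ?_⟩
        · simp only [pvBStep, ← hj_def, ← hlv_def, ← hk_def]
          rw [if_pos hjlt, if_pos hj0]
          simp only [List.singleton_append, pvMin3, List.foldl_cons, List.foldl_nil]
          rw [if_pos hlt, hgdk]
        · refine mkChoice k (hk_lt hj0) (fun p hp hpk => ?_)
          rcases Nat.lt_or_ge p j with hpj | hpj
          · exact hLbest hj0 p hp hpj hpk
          · by_cases hpj' : p = j
            · subst hpj'; exact hkey
            · exact pvKeyLt_trans v _ _ _ hkey (hRbest hjlt p hp hpj hpj')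
      · -- right candidate wins
        have hkey : pvKeyLt v (arr[j]'hjlt) (arr[k]'(hk_lt hj0)) := by
          rw [hgdj, hgdk] at hlt
          simp only [pvLt3, Bool.or_eq_true, Bool.and_eq_true, decide_eq_true_eq, beq_iff_eq,
            not_or] at hlt
          unfold pvKeyLt
          rw [habsL, habsR]
          push Not at hlt
          rcases hlt with ⟨h1, h2⟩
          rcases lt_or_eq_of_le h1 with h | h
          · exact Or.inl h
          · refine Or.inr ⟨h, ?_⟩
            have h3 := h2 h.symm
            exact lt_of_le_of_ne h3.1 (fun e => hsndkj e.symm)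
        refine ⟨j, hjlt, ?_, ?_⟩
        · simp only [pvBStep, ← hj_def, ← hlv_def, ← hk_def]
          rw [if_pos hjlt, if_pos hj0]
          simp only [List.singleton_append, pvMin3, List.foldl_cons, List.foldl_nil]
          rw [if_neg hlt, hgdj]
        · refine mkChoice j hjlt (fun p hp hpj => ?_)
          rcases Nat.lt_or_ge p j with hpj' | hpj'
          · by_cases hpk : p = k
            · subst hpk; exact hkey
            · exact pvKeyLt_trans v _ _ _ hkey (hLbest hj0 p hp hpj' hpk)
          · exact hRbest hjlt p hp hpj' hpj
    · -- only the right candidate (j = 0)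
      have hj0' : j = 0 := by omega
      refine ⟨j, hjlt, ?_, ?_⟩
      · simp only [pvBStep, ← hj_def, ← hlv_def, ← hk_def]
        rw [if_pos hjlt, if_neg (by omega)]
        simp only [List.append_nil, pvMin3, List.foldl_nil]
        rw [List.getD_eq_getElem arr (0,0) hjlt]
      · exact mkChoice j hjlt (fun p hp hpj => hRbest hjlt p hp (by omega) hpj)
  · -- only the left candidate (j = arr.length)
    have hj0 : 0 < j := by omega
    refine ⟨k, hk_lt hj0, ?_, ?_⟩
    · simp only [pvBStep, ← hj_def, ← hlv_def, ← hk_def]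
      rw [if_neg hjlt, if_pos hj0]
      simp only [List.nil_append, pvMin3, List.foldl_nil]
      rw [List.getD_eq_getElem arr (0,0) (hk_lt hj0)]
    · exact mkChoice k (hk_lt hj0) (fun p hp hpk => hLbest hj0 p hp (by omega) hpk)

-- the comparator sorted2 uses in port B, and sortedness of its output
def pvBefore (a b : Int × Int) : Bool :=
  decide (a.1 < b.1) || (!decide (b.1 < a.1) && decide (a.2 < b.2))

theorem pvLexLe_trans (a b c : Int × Int) (h1 : pvLexLe a b) (h2 : pvLexLe b c) :
    pvLexLe a c := by
  unfold pvLexLe at *; omega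

theorem pvBefore_true (a b : Int × Int) (h : pvBefore a b = true) : pvLexLe a b := by
  simp [pvBefore] at h; unfold pvLexLe; omega

theorem pvBefore_false (a b : Int × Int) (h : pvBefore a b = false) : pvLexLe b a := by
  simp [pvBefore] at h; unfold pvLexLe; omega

theorem pvInsertBy_pairwise (x : Int × Int) :
    ∀ (l : List (Int × Int)), l.Pairwise pvLexLe →
      (PySem.List.insertBy pvBefore x l).Pairwise pvLexLe := by
  intro l
  induction l with
  | nil => intro _; simp [PySem.List.insertBy]
  | cons y ys ih =>
    intro h
    rw [List.pairwise_cons] at h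
    obtain ⟨hy, hys⟩ := h
    have hstep : PySem.List.insertBy pvBefore x (y :: ys) =
        if pvBefore x y then x :: y :: ys else y :: PySem.List.insertBy pvBefore x ys := by
      simp [PySem.List.insertBy]
    rw [hstep]
    by_cases hb : pvBefore x y = true
    · rw [if_pos hb]
      have hxy : pvLexLe x y := pvBefore_true x y hb
      refine List.pairwise_cons.2 ⟨?_, List.pairwise_cons.2 ⟨hy, hys⟩⟩
      intro z hz
      rcases List.mem_cons.1 hz with rfl | hz'
      · exact hxy
      · exact pvLexLe_trans x y z hxy (hy z hz')
    · rw [if_neg hb]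
      have hyx : pvLexLe y x := pvBefore_false x y (Bool.not_eq_true _ ▸ (by simpa using hb))
      refine List.pairwise_cons.2 ⟨?_, ih hys⟩
      intro z hz
      rcases (PySem.List.mem_insertBy pvBefore x z ys).1 hz with rfl | hz'
      · exact hyx
      · exact hy z hz'

theorem pvSorted2_pairwise (xs : List (Int × Int)) :
    (PySem.List.sorted2 xs (fun q => q.1) (fun q => q.2) false).Pairwise pvLexLe := by
  show (List.foldl (fun acc x => PySem.List.insertBy _ x acc) [] xs).Pairwise pvLexLe
  suffices h : ∀ (acc : List (Int × Int)), acc.Pairwise pvLexLe →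
      (List.foldl (fun acc x => PySem.List.insertBy pvBefore x acc) acc xs).Pairwise pvLexLe by
    exact h [] (List.Pairwise.nil)
  induction xs with
  | nil => intro acc hacc; exact hacc
  | cons x xs ih =>
    intro acc hacc
    exact ih _ (pvInsertBy_pairwise x acc hacc)

-- removing the unique element with first component x.1 is a permutation-level erase
theorem pvFilter_perm (x : Int × Int) :
    ∀ (F : List (Int × Int)), x ∈ F → (F.map Prod.fst).Nodup →
      F.Perm (x :: F.filter (fun p => !(p.1 == x.1))) := by
  intro F
  induction F with
  | nil => intro h; simp at h
  | cons y t ih =>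
    intro hx hnd
    simp only [List.map_cons, List.nodup_cons] at hnd
    obtain ⟨hy1, hndt⟩ := hnd
    rcases List.mem_cons.1 hx with rfl | hxt
    · have hfilt : t.filter (fun p => !(p.1 == x.1)) = t := by
        apply List.filter_eq_self.2
        intro p hp
        simp only [Bool.not_eq_eq_eq_not, Bool.not_true, beq_eq_false_iff_ne, ne_eq]
        intro he
        exact hy1 (he ▸ List.mem_map_of_mem hp)
      simp [hfilt]
    · have hyne : (y.1 == x.1) = false := by
        simp only [beq_eq_false_iff_ne, ne_eq]
        intro he
        exact hy1 (he ▸ List.mem_map_of_mem hxt)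
      have hp1 : (y :: t).Perm (y :: x :: t.filter (fun p => !(p.1 == x.1))) :=
        (ih hxt hndt).cons y
      have hp2 : (y :: t).Perm (x :: y :: t.filter (fun p => !(p.1 == x.1))) :=
        hp1.trans (List.Perm.swap x y _)
      have hfc : (y :: t).filter (fun p => !(p.1 == x.1)) =
          y :: t.filter (fun p => !(p.1 == x.1)) := by
        simp [hyne]
      rw [hfc]
      exact hp2

theorem pvF_step (s2 : List Int) (used : PySem.Set Int) (i : Int) :
    pvF s2 (PySem.Set.add used i) = (pvF s2 used).filter (fun p => !(p.1 == i)) := by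
  unfold pvF
  rw [List.filter_filter]
  apply List.filter_congr
  intro p _
  by_cases h1 : p.1 = i
  · subst h1
    simp
  · simp [h1]

theorem pvF_fst_nodup (s2 : List Int) (used : PySem.Set Int) :
    ((pvF s2 used).map Prod.fst).Nodup := by
  have hpw : (pvF s2 used).Pairwise (fun a b => a.1 < b.1) :=
    List.Pairwise.sublist List.filter_sublist (PySem.List.pairwise_lt_enumerate s2 0)
  have : ((pvF s2 used).map Prod.fst).Pairwise (· < ·) := List.pairwise_map.2 hpw
  exact this.imp ne_of_lt

-- the main loop invariant
theorem pvLoop (s2 : List Int) :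
    ∀ (s1 : List Int) (pairsB : List (Int × Int)) (used : PySem.Set Int)
      (arr : List (Int × Int)),
      s1.length ≤ arr.length →
      arr.Pairwise pvLexLe →
      ((pvF s2 used).map Prod.swap).Perm arr →
      (s1.foldl (pvAStep s2) (pairsB.map (fun p => (p.1, some p.2)), used)).1 =
        ((s1.foldl pvBStep (pairsB, arr, arr.map Prod.fst)).1).map
          (fun p => (p.1, some p.2)) := by
  intro s1
  induction s1 with
  | nil => intro pairsB used arr _ _ _; simp
  | cons v s1 ih =>
    intro pairsB used arr hlen hpw hperm
    have harrne : arr ≠ [] := by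
      intro h; rw [h] at hlen; simp at hlen
    have hFne : pvF s2 used ≠ [] := by
      intro h
      rw [h] at hperm
      simp only [List.map_nil] at hperm
      exact harrne hperm.nil_eq.symm
    have hnd : (arr.map Prod.snd).Nodup := by
      have h1 : ((pvF s2 used).map Prod.swap).map Prod.snd = (pvF s2 used).map Prod.fst := by
        simp [Function.comp]
      have h2 : (((pvF s2 used).map Prod.swap).map Prod.snd).Perm (arr.map Prod.snd) :=
        hperm.map Prod.snd
      rw [h1] at h2
      exact h2.nodup (pvF_fst_nodup s2 used)
    obtain ⟨pos, hpos, hstepB, hchoiceB⟩ := pvBStep_eq v pairsB arr hpw hnd harrne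
    obtain ⟨hinner, hchoiceA⟩ := pvAInner_eq s2 used v _ hFne rfl
    set qA := pvSelGo v (pvF s2 used).headI (pvF s2 used).tail with hqA
    -- the two selections coincide
    have hchoiceA' : pvIsChoice v arr (qA.2, qA.1) :=
      pvChoice_perm v _ arr _ hperm (pvChoiceM_swap v _ qA hchoiceA)
    have heqsel : (qA.2, qA.1) = arr[pos]'hpos :=
      pvChoice_unique v arr _ _ hchoiceA' hchoiceB
    -- one step of A
    have hstepA : pvAStep s2 (pairsB.map (fun p => (p.1, some p.2)), used) v =
        ((pairsB ++ [(v, (arr[pos]'hpos).1)]).map (fun p => (p.1, some p.2)),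
          PySem.Set.add used (arr[pos]'hpos).2) := by
      simp only [pvAStep, hinner]
      rw [← heqsel]
      simp
    -- the new pool still corresponds
    have hx : Prod.swap (arr[pos]'hpos) ∈ pvF s2 used := by
      have hmem : (arr[pos]'hpos) ∈ (pvF s2 used).map Prod.swap :=
        hperm.mem_iff.2 (List.getElem_mem hpos)
      rcases List.mem_map.1 hmem with ⟨y, hy, hyx⟩
      have : y = Prod.swap (arr[pos]'hpos) := by
        rw [← hyx]; simp
      rwa [this] at hy
    have hperm' : ((pvF s2 (PySem.Set.add used (arr[pos]'hpos).2)).map Prod.swap).Perm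
        (arr.eraseIdx pos) := by
      rw [pvF_step]
      have h1 := pvFilter_perm (Prod.swap (arr[pos]'hpos)) (pvF s2 used) hx
        (pvF_fst_nodup s2 used)
      have h2 := h1.map Prod.swap
      simp only [List.map_cons, Prod.swap_swap] at h2
      have hc1 : ((arr[pos]'hpos) ::
          (((pvF s2 used).filter (fun p => !(p.1 == (arr[pos]'hpos).2))).map Prod.swap)).Perm
          ((pvF s2 used).map Prod.swap) := by
        have hsw : (Prod.swap (arr[pos]'hpos)).1 = (arr[pos]'hpos).2 := rfl
        rw [← hsw]
        exact h2.symm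
      exact ((hc1.trans hperm).trans (List.getElem_cons_eraseIdx_perm hpos).symm).cons_inv
    have hpw' : (arr.eraseIdx pos).Pairwise pvLexLe :=
      List.Pairwise.sublist (List.eraseIdx_sublist arr pos) hpw
    have hlen' : s1.length ≤ (arr.eraseIdx pos).length := by
      rw [List.length_eraseIdx]
      simp only [List.length_cons] at hlen
      rw [if_pos hpos]
      omega
    rw [List.foldl_cons, List.foldl_cons, hstepA, hstepB]
    rw [List.eraseIdx_map Prod.fst arr pos]
    exact ih (pairsB ++ [(v, (arr[pos]'hpos).1)]) (PySem.Set.add used (arr[pos]'hpos).2)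
      (arr.eraseIdx pos) hlen' hpw' hperm'

-- the final comprehension, through the (·, some ·) correspondence
theorem pvFinal_filter :
    ∀ (l : List (Int × Int)),
      (l.map (fun p => (p.1, some p.2))).filterMap
          (fun p => p.2.bind (fun b => if |p.1 - b| < 30 then some (p.1, b) else none)) =
        l.filter (fun p => decide (|p.1 - p.2| < 30)) := by
  intro l
  induction l with
  | nil => rfl
  | cons x xs ih =>
    simp only [List.map_cons, List.filterMap_cons, List.filter_cons, Option.bind_some]
    by_cases h : |x.1 - x.2| < 30
    · simp [h, ih]
    · simp [h, ih]

-- ===== VERDICT (by name: the statement is the Claim_ definition above) =====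
theorem find_closest_sentences_spec : Claim_equal_find_closest_sentences := by
  intro s1 s2 _ hpre
  unfold Spec_find_closest_sentences find_closest_sentences find_closest_sentences_alt
  show (List.foldl (pvAStep s2) ([], PySem.Set.empty) s1).1.filterMap
      (fun p => p.2.bind fun b => if |p.1 - b| < 30 then some (p.1, b) else none) =
    List.filter (fun p => decide (|p.1 - p.2| < 30))
      (List.foldl pvBStep
        ([], PySem.List.sorted2 ((PySem.List.enumerate s2).map Prod.swap)
              (fun q => q.1) (fun q => q.2) false,
          (PySem.List.sorted2 ((PySem.List.enumerate s2).map Prod.swap)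
              (fun q => q.1) (fun q => q.2) false).map Prod.fst) s1).1
  have hF0 : pvF s2 PySem.Set.empty = PySem.List.enumerate s2 := by
    unfold pvF
    apply List.filter_eq_self.2
    intro p _
    rfl
  have hperm0 : ((pvF s2 PySem.Set.empty).map Prod.swap).Perm
      (PySem.List.sorted2 ((PySem.List.enumerate s2).map Prod.swap)
        (fun q => q.1) (fun q => q.2) false) := by
    rw [hF0]
    exact (PySem.List.sorted2_perm _ _ _ _).symm
  have hlen0 : s1.length ≤ (PySem.List.sorted2 ((PySem.List.enumerate s2).map Prod.swap)
      (fun q => q.1) (fun q => q.2) false).length := by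
    rw [(PySem.List.sorted2_perm _ _ _ _).length_eq]
    simpa using hpre
  have hmain := pvLoop s2 s1 [] PySem.Set.empty _ hlen0 (pvSorted2_pairwise _) hperm0
  simp only [List.map_nil] at hmain
  rw [hmain]
  exact pvFinal_filter _
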